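-- pv_equiv track=rewrite | github.com/robban112/AdventOfCode2018 | 07/main.py | getFirstsStep
-- ===== SOURCE A (Python) =====
-- def getFirstsStep(order):
--     firsts = []
--     for key1 in order:
--         isFirst = True
--         for key2 in order:
--             if key1 != key2:
--                 if key1 in order[key2]:
--                     isFirst = False
--         if isFirst:
--             firsts.append(key1)
--     return firsts
-- ===== SOURCE B (Python) =====
-- def getFirstsStep(order):
--     blocked = set()
--     for k, deps in order.items():
--         for d in deps:
--             if d != k:
--                 blocked.add(d)
--     return [k for k in order if k not in blocked]
-- ===== Notes on version B (the rewrite author's own statement) =====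
-- stated objective: faster
-- what changed: Instead of testing each key against every other key's dependency list (nested loops), B makes one pass collecting every dependency that is not its own key into a 'blocked' set and then filters the keys by set membership.
import Mathlib
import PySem

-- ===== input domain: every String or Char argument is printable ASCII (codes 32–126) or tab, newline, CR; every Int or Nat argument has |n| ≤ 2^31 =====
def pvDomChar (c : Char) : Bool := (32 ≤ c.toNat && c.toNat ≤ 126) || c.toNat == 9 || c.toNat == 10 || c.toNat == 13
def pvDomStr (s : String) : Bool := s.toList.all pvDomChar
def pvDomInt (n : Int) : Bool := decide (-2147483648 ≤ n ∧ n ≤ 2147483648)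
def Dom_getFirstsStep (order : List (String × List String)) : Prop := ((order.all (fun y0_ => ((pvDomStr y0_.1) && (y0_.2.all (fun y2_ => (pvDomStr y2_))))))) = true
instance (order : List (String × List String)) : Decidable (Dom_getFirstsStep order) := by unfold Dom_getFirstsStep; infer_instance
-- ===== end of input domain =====

-- B replaces A's nested loops over the keys by one pass building a 'blocked' set and a filter (asymptotically faster).

-- ===== PORT A =====
-- A iterates the dict's keys in a nested loop, looking each key up in every other key's list.
def getFirstsStep (order : List (String × List String)) : List String :=
  let d := PySem.Dict.ofList order
  d.keys.foldl
    (fun firsts key1 =>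
      let isFirst := d.keys.foldl
        (fun isFirst key2 =>
          if key1 ≠ key2 then
            (if key1 ∈ d.getD key2 [] then false else isFirst)
          else isFirst) true
      if isFirst then firsts ++ [key1] else firsts) []

-- ===== PORT B =====
-- B makes one pass over the items collecting dependencies ≠ their own key into a set, then filters the keys.
def getFirstsStep_alt (order : List (String × List String)) : List String :=
  let d := PySem.Dict.ofList order
  let blocked : PySem.Set String :=
    d.items.foldl
      (fun blocked p =>
        p.2.foldl (fun blocked e => if e ≠ p.1 then PySem.Set.add blocked e else blocked) blocked)
      PySem.Set.empty
  d.keys.filter (fun k => !(PySem.Set.contains blocked k))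

-- ===== PRECONDITION & SPEC =====
def Spec_getFirstsStep (order : List (String × List String)) (out : List String) : Prop := out = getFirstsStep_alt order
instance (order : List (String × List String)) (out : List String) : Decidable (Spec_getFirstsStep order out) := by unfold Spec_getFirstsStep; infer_instance

-- ===== CLAIM (what is proved, stated in full; the proofs are below) =====
def Claim_equal_getFirstsStep : Prop := ∀ (order : List (String × List String)), Dom_getFirstsStep order → Spec_getFirstsStep order (getFirstsStep order)

-- ===== LEMMAS AND PROOFS =====

-- A's inner flag loop computes "no key2 satisfies the condition".
theorem foldl_flag_eq_not_any (keys : List String) (p q : String → Prop)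
    [DecidablePred p] [DecidablePred q] (b : Bool) :
    keys.foldl (fun isFirst key2 => if p key2 then (if q key2 then false else isFirst) else isFirst) b
      = (b && !(keys.any (fun k2 => decide (p k2) && decide (q k2)))) := by
  induction keys generalizing b with
  | nil => simp
  | cons k t ih =>
    simp only [List.foldl_cons, List.any_cons, ih]
    by_cases h1 : p k <;> by_cases h2 : q k <;> simp [h1, h2]

-- membership in the inner conditional-add loop of B
theorem mem_inner_blocked (deps : List String) (k : String) (s : PySem.Set String) (y : String) :
    (y ∈ deps.foldl (fun blocked e => if e ≠ k then PySem.Set.add blocked e else blocked) s)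
      ↔ y ∈ s ∨ (y ∈ deps ∧ y ≠ k) := by
  induction deps generalizing s with
  | nil => simp
  | cons e t ih =>
    simp only [List.foldl_cons]
    by_cases h : e = k
    · subst h
      simp only [ne_eq, not_true_eq_false, if_false, ih, List.mem_cons]
      constructor
      · tauto
      · rintro (hs | ⟨(rfl | ht), hy⟩) <;> tauto
    · simp only [ne_eq, h, not_false_eq_true, if_true, ih, PySem.Set.mem_add, List.mem_cons]
      constructor
      · rintro ((hs | rfl) | ⟨ht, hy⟩) <;> tauto
      · rintro (hs | ⟨(rfl | ht), hy⟩) <;> tauto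

-- membership in B's blocked set
theorem mem_blocked (items : List (String × List String)) (s : PySem.Set String) (y : String) :
    (y ∈ items.foldl
        (fun blocked p =>
          p.2.foldl (fun blocked e => if e ≠ p.1 then PySem.Set.add blocked e else blocked) blocked) s)
      ↔ y ∈ s ∨ ∃ p ∈ items, y ∈ p.2 ∧ y ≠ p.1 := by
  induction items generalizing s with
  | nil => simp
  | cons q t ih =>
    simp only [List.foldl_cons, ih, mem_inner_blocked, List.mem_cons]
    constructor
    · rintro ((hs | hq) | ⟨p, hp, hy⟩)
      · exact Or.inl hs
      · exact Or.inr ⟨q, Or.inl rfl, hq⟩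
      · exact Or.inr ⟨p, Or.inr hp, hy⟩
    · rintro (hs | ⟨p, (rfl | hp), hy⟩)
      · exact Or.inl (Or.inl hs)
      · exact Or.inl (Or.inr hy)
      · exact Or.inr ⟨p, hp, hy⟩

-- ===== VERDICT (by name: the statement is the Claim_ definition above) =====
theorem getFirstsStep_spec : Claim_equal_getFirstsStep := by
  intro order _
  show getFirstsStep order = getFirstsStep_alt order
  unfold getFirstsStep getFirstsStep_alt
  set d := PySem.Dict.ofList order with hd
  have hnd : d.keys.Nodup := PySem.Dict.nodup_keys_ofList order
  rw [PySem.List.foldl_append_if]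
  simp only [List.nil_append, List.map_id']
  apply List.filter_congr
  intro k1 hk1
  rw [foldl_flag_eq_not_any d.keys (fun k2 => k1 ≠ k2) (fun k2 => k1 ∈ d.getD k2 []) true,
    Bool.true_and]
  congr 1
  rw [Bool.eq_iff_iff, List.any_eq_true]
  have hc : ∀ (t : PySem.Set String),
      PySem.Set.contains t k1 = true ↔ k1 ∈ t := by
    intro t; simp [PySem.Set.contains]
  rw [hc, mem_blocked]
  constructor
  · rintro ⟨k2, hk2, hcond⟩
    have hne : k1 ≠ k2 := by
      by_contra h; simp [h] at hcond
    have hmem : k1 ∈ d.getD k2 [] := by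
      simp [hne] at hcond; exact hcond
    refine Or.inr ⟨(k2, d.getD k2 []), ?_, hmem, hne⟩
    rw [PySem.Dict.items_eq_map_keys d hnd []]
    exact List.mem_map.mpr ⟨k2, hk2, rfl⟩
  · rintro (h | ⟨⟨k2, v2⟩, hp, hy, hne⟩)
    · simp at h
    · refine ⟨k2, PySem.Dict.mem_keys_of_mem_items d hp, ?_⟩
      have hv : d.getD k2 [] = v2 := PySem.Dict.getD_of_mem_items d hp hnd []
      simp only at hy hne
      simp [hne, hv, hy]
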